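-- pv_equiv track=rewrite | github.com/pypi-data/pypi-mirror-252 | packages/coimealta/coimealta-0.0.13.tar.gz/coimealta-0.0.13/src/coimealta/contacts/contacts_data.py | names_string
-- ===== SOURCE A (Python) =====
-- def string_list_with_and(items):
--     return (", ".join(items[:-1])
--             + ", and "
--             + items[-1] if len(items) > 2 else items[0]
--             + " and "
--             + items[1] if len(items) == 2 else items[0])
--
-- def names_string(people):
--     by_surname = {}
--     for person in people:
--         surname = person.get('Surname', "")
--         if surname not in by_surname:
--             by_surname[surname] = []
--         by_surname[surname].append(person.get('Given name', ""))
--     names = [string_list_with_and(sorted(by_surname[surname]))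
--              + " "
--              + surname for surname in sorted(by_surname.keys())]
--     return string_list_with_and(names)
-- ===== SOURCE B (Python) =====
-- def names_string(people):
--     def fmt(items):
--         if len(items) > 2:
--             return ", ".join(items[:-1]) + ", and " + items[-1]
--         if len(items) == 2:
--             return items[0] + " and " + items[1]
--         return items[0]
--     surnames = sorted(set(p.get('Surname', "") for p in people))
--     names = [fmt(sorted([p.get('Given name', "")
--                          for p in people
--                          if p.get('Surname', "") == s])) + " " + s
--              for s in surnames]
--     return fmt(names)
-- ===== Notes on version B (the rewrite author's own statement) =====
-- stated objective: idiomatic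
-- what changed: B replaces A's one-pass dict grouping (surname -> accumulated given-name list) with a sorted set of surnames followed by a filtering comprehension per surname; the chained-ternary formatter becomes plain early-return ifs.
import Mathlib
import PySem

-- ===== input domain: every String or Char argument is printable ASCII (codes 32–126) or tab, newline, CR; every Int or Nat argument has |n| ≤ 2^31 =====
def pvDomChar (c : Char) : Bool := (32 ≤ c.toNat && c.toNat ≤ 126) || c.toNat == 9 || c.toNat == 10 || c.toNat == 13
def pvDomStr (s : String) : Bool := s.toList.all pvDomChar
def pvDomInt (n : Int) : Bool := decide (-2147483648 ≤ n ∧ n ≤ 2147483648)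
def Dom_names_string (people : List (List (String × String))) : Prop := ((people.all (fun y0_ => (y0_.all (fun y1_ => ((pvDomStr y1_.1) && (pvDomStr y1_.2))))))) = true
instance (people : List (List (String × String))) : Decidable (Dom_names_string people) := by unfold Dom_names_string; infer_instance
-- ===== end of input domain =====

-- B groups by filtering a sorted set of surnames instead of A's one-pass dict accumulation (idiomatic rewrite, same values; both raise on empty input, excluded by Pre_).


-- ===== PORT A =====
-- person.get('Surname', "") / person.get('Given name', "") on the association-list dict
def pvSurname (person : List (String × String)) : String :=
  (PySem.Dict.mk person).getD "Surname" ""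
def pvGiven (person : List (String × String)) : String :=
  (PySem.Dict.mk person).getD "Given name" ""

-- string_list_with_and: chained conditional expression; items[0]/items[-1] raise on too-short input,
-- modelled by pyGet? with default "" — the default is only reachable outside Pre_ (empty items).
def string_list_with_and (items : List String) : String :=
  if 2 < items.length then
    PySem.Str.join ", " (PySem.List.slice items none (some (-1))) ++ ", and "
      ++ ((PySem.List.pyGet? items (-1)).getD "")
  else if items.length = 2 then
    ((PySem.List.pyGet? items 0).getD "") ++ " and " ++ ((PySem.List.pyGet? items 1).getD "")
  else
    (PySem.List.pyGet? items 0).getD ""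

-- the body of A's for-loop over people
def pvStepA (d : PySem.Dict String (List String)) (person : List (String × String)) :
    PySem.Dict String (List String) :=
  let surname := pvSurname person
  let d' := if d.contains surname then d else d.insert surname []
  d'.modify surname [] (fun gs => gs ++ [pvGiven person])

def names_string (people : List (List (String × String))) : String :=
  let by_surname := people.foldl pvStepA PySem.Dict.empty
  let names :=
    (PySem.List.sorted by_surname.keys (fun k => k) false).map
      (fun surname =>
        string_list_with_and (PySem.List.sorted (by_surname.getD surname []) (fun g => g) false)
          ++ " " ++ surname)
  string_list_with_and names

-- ===== PORT B =====
-- fmt: early-return ifs (same cases as A's helper); the last return raises on [] — default "" outside Pre_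
def pvFmt (items : List String) : String :=
  if 2 < items.length then
    PySem.Str.join ", " (PySem.List.slice items none (some (-1))) ++ ", and "
      ++ ((PySem.List.pyGet? items (-1)).getD "")
  else if items.length = 2 then
    ((PySem.List.pyGet? items 0).getD "") ++ " and " ++ ((PySem.List.pyGet? items 1).getD "")
  else
    (PySem.List.pyGet? items 0).getD ""

def names_string_alt (people : List (List (String × String))) : String :=
  let surnames :=
    PySem.List.sorted (PySem.Set.ofList (people.map pvSurname)) (fun k => k) false
  let names :=
    surnames.map (fun s =>
      pvFmt (PySem.List.sorted
              ((people.filter (fun p => pvSurname p == s)).map pvGiven) (fun g => g) false)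
        ++ " " ++ s)
  pvFmt names

-- ===== PRECONDITION & SPEC =====
-- Pre_ excludes only the empty list, on which Python A raises IndexError (items[0] of the empty names list).
def Pre_names_string (people : List (List (String × String))) : Prop := people ≠ []
instance (people : List (List (String × String))) : Decidable (Pre_names_string people) := by
  unfold Pre_names_string; infer_instance
def pvWitness_names_string : (List (List (String × String))) :=
  [[("Surname", "Smith"), ("Given name", "Ann")]]

def Spec_names_string (people : List (List (String × String))) (out : String) : Prop := out = names_string_alt people
instance (people : List (List (String × String))) (out : String) : Decidable (Spec_names_string people out) := by unfold Spec_names_string; infer_instance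

-- ===== CLAIM (what is proved, stated in full; the proofs are below) =====
def Claim_equal_names_string : Prop := ∀ (people : List (List (String × String))), Dom_names_string people → Pre_names_string people → Spec_names_string people (names_string people)

-- ===== LEMMAS AND PROOFS =====

-- A's helper and B's helper are the same function
theorem string_list_with_and_eq_pvFmt (items : List String) :
    string_list_with_and items = pvFmt items := rfl

-- one loop step: keys gain the surname
theorem keys_pvStepA (d : PySem.Dict String (List String)) (p : List (String × String)) :
    (pvStepA d p).keys = PySem.Set.add d.keys (pvSurname p) := by
  unfold pvStepA PySem.Set.add
  by_cases h : d.contains (pvSurname p) = true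
  · simp only [h, if_true]
    rw [PySem.Dict.keys_modify, PySem.Dict.keys_insert_of_contains _ _ h]
    simp [PySem.Set.contains, (PySem.Dict.contains_iff_mem_keys d _).mp h]
  · simp only [Bool.not_eq_true] at h
    simp only [h, Bool.false_eq_true, if_false]
    rw [PySem.Dict.keys_modify]
    rw [PySem.Dict.keys_insert_of_contains _ _ (PySem.Dict.contains_insert_self d _ _)]
    rw [PySem.Dict.keys_insert_of_not_contains _ _ h]
    have hnm : pvSurname p ∉ d.keys := fun hm =>
      absurd ((PySem.Dict.contains_iff_mem_keys d _).mpr hm) (by simp [h])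
    simp [PySem.Set.contains, hnm]

-- one loop step: the stored given-name list
theorem getD_pvStepA (d : PySem.Dict String (List String)) (p : List (String × String)) (c : String) :
    (pvStepA d p).getD c [] =
      if pvSurname p == c then d.getD c [] ++ [pvGiven p] else d.getD c [] := by
  unfold pvStepA
  by_cases h : d.contains (pvSurname p) = true
  · simp only [h, if_true]
    rw [PySem.Dict.getD_modify]
    by_cases hc : c = pvSurname p
    · subst hc; simp
    · simp [hc, beq_iff_eq, Ne.symm hc]
  · simp only [Bool.not_eq_true] at h
    simp only [h, Bool.false_eq_true, if_false]
    rw [PySem.Dict.getD_modify]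
    by_cases hc : c = pvSurname p
    · subst hc
      simp [PySem.Dict.getD_of_not_contains _ _ h]
    · simp [hc, beq_iff_eq, Ne.symm hc, PySem.Dict.getD_insert]

-- the whole loop: keys are the surnames as a set
theorem keys_foldl_pvStepA (people : List (List (String × String)))
    (d : PySem.Dict String (List String)) :
    (people.foldl pvStepA d).keys = PySem.Set.update d.keys (people.map pvSurname) := by
  induction people generalizing d with
  | nil => simp [PySem.Set.update]
  | cons p ps ih =>
      simp only [List.foldl_cons, List.map_cons]
      rw [ih, keys_pvStepA]
      rfl

-- the whole loop: the stored list for any surname c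
theorem getD_foldl_pvStepA (people : List (List (String × String)))
    (d : PySem.Dict String (List String)) (c : String) :
    (people.foldl pvStepA d).getD c [] =
      d.getD c [] ++ (people.filter (fun p => pvSurname p == c)).map pvGiven := by
  induction people generalizing d with
  | nil => simp
  | cons p ps ih =>
      simp only [List.foldl_cons, List.filter_cons]
      rw [ih, getD_pvStepA]
      by_cases h : pvSurname p == c
      · simp [h]
      · simp [h]

-- ===== VERDICT (by name: the statement is the Claim_ definition above) =====
theorem names_string_spec : Claim_equal_names_string := by
  intro people _ _
  unfold Spec_names_string names_string names_string_alt
  have hkeys : (people.foldl pvStepA PySem.Dict.empty).keys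
      = PySem.Set.ofList (people.map pvSurname) := by
    rw [keys_foldl_pvStepA]
    simp [PySem.Dict.keys_empty]
    rfl
  have hgetD : ∀ c, (people.foldl pvStepA PySem.Dict.empty).getD c []
      = (people.filter (fun p => pvSurname p == c)).map pvGiven := by
    intro c
    rw [getD_foldl_pvStepA]
    simp [PySem.Dict.getD_empty]
  simp only [hkeys, hgetD, string_list_with_and_eq_pvFmt]
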